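-- pv_equiv track=rewrite | github.com/kenbockler/Andmeteaduse_masin-ppe_projekt | PROJEKT/K05/S182/2021-09-26-16-41-13/kodu3.py | moos
-- ===== SOURCE A (Python) =====
-- def moos(suuredkarbid, väiksedkarbid, kogus):
--     karpe=0
--     if kogus<=suuredkarbid*5+väiksedkarbid:
--         while kogus-5>=0 and suuredkarbid>0:
--             kogus-=5
--             karpe+=1
--             suuredkarbid-=1
--         while kogus-1>=0 and väiksedkarbid>0:
--             kogus-=1
--             karpe+=1
--             väiksedkarbid-=1
--         return(karpe)
--     else:
--         return(-1)
-- ===== SOURCE B (Python) =====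
-- def moos(suuredkarbid, väiksedkarbid, kogus):
--     if kogus > suuredkarbid * 5 + väiksedkarbid:
--         return -1
--     big = max(0, min(suuredkarbid, kogus // 5))
--     rem = kogus - 5 * big
--     return big + max(0, min(väiksedkarbid, rem))
-- ===== Notes on version B (the rewrite author's own statement) =====
-- stated objective: faster
-- what changed: Replaces the two decrement-by-one/five greedy while-loops with a closed-form computation (big = max(0, min(suured, kogus//5)), then small likewise on the remainder), O(kogus) -> O(1).
import Mathlib
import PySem

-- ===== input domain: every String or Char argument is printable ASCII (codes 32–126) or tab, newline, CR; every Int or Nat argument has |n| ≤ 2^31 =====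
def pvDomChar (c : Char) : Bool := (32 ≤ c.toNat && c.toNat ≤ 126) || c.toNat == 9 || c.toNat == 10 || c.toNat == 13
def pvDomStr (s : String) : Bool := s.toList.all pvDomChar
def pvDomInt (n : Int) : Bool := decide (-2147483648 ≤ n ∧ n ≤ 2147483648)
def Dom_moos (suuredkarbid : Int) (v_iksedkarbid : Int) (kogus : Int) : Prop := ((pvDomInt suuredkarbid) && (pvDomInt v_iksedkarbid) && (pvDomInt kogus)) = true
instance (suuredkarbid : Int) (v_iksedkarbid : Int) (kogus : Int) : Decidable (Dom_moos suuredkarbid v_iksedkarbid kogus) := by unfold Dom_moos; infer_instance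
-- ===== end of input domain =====

-- B replaces A's two greedy decrement loops with a closed-form min/max computation (objective: faster, O(1) vs O(kogus)).

-- ===== PORT A =====
-- first while loop: state (suuredkarbid, kogus, karpe), returns final (kogus, karpe)
def moosLoop1 (suuredkarbid kogus karpe : Int) : Int × Int :=
  if kogus - 5 ≥ 0 ∧ suuredkarbid > 0 then
    moosLoop1 (suuredkarbid - 1) (kogus - 5) (karpe + 1)
  else (kogus, karpe)
termination_by kogus.toNat
decreasing_by omega

-- second while loop: state (v_iksedkarbid, kogus, karpe), returns final karpe
def moosLoop2 (v_iksedkarbid kogus karpe : Int) : Int :=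
  if kogus - 1 ≥ 0 ∧ v_iksedkarbid > 0 then
    moosLoop2 (v_iksedkarbid - 1) (kogus - 1) (karpe + 1)
  else karpe
termination_by kogus.toNat
decreasing_by omega

def moos (suuredkarbid : Int) (v_iksedkarbid : Int) (kogus : Int) : Int :=
  if kogus ≤ suuredkarbid * 5 + v_iksedkarbid then
    let p := moosLoop1 suuredkarbid kogus 0
    moosLoop2 v_iksedkarbid p.1 p.2
  else -1

-- ===== PORT B =====
def moos_alt (suuredkarbid : Int) (v_iksedkarbid : Int) (kogus : Int) : Int :=
  if kogus > suuredkarbid * 5 + v_iksedkarbid then -1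
  else
    let big := max 0 (min suuredkarbid (PySem.Int.floordiv kogus 5))
    let rem := kogus - 5 * big
    big + max 0 (min v_iksedkarbid rem)

-- ===== PRECONDITION & SPEC =====
def Spec_moos (suuredkarbid : Int) (v_iksedkarbid : Int) (kogus : Int) (out : Int) : Prop := out = moos_alt suuredkarbid v_iksedkarbid kogus
instance (suuredkarbid : Int) (v_iksedkarbid : Int) (kogus : Int) (out : Int) : Decidable (Spec_moos suuredkarbid v_iksedkarbid kogus out) := by unfold Spec_moos; infer_instance

-- ===== CLAIM (what is proved, stated in full; the proofs are below) =====
def Claim_equal_moos : Prop := ∀ (suuredkarbid : Int) (v_iksedkarbid : Int) (kogus : Int), Dom_moos suuredkarbid v_iksedkarbid kogus → Spec_moos suuredkarbid v_iksedkarbid kogus (moos suuredkarbid v_iksedkarbid kogus)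

-- ===== LEMMAS AND PROOFS =====
theorem moosLoop1_eq (suuredkarbid kogus karpe : Int) :
    moosLoop1 suuredkarbid kogus karpe =
      (kogus - 5 * max 0 (min suuredkarbid (kogus / 5)),
       karpe + max 0 (min suuredkarbid (kogus / 5))) := by
  fun_induction moosLoop1 with
  | case1 s k c h ih =>
      rw [ih]
      have h5 : (k - 5) / 5 = k / 5 - 1 := by omega
      rw [h5]
      simp only [Prod.mk.injEq]
      constructor <;> omega
  | case2 s k c h =>
      have : max 0 (min s (k / 5)) = 0 := by omega
      rw [this]; simp only [Prod.mk.injEq]; constructor <;> omega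

theorem moosLoop2_eq (v_iksedkarbid kogus karpe : Int) :
    moosLoop2 v_iksedkarbid kogus karpe = karpe + max 0 (min v_iksedkarbid kogus) := by
  fun_induction moosLoop2 with
  | case1 v k c h ih => rw [ih]; omega
  | case2 v k c h => omega

-- ===== VERDICT (by name: the statement is the Claim_ definition above) =====
theorem moos_spec : Claim_equal_moos := by
  intro s v k _
  unfold Spec_moos moos moos_alt
  rw [PySem.Int.floordiv_eq_ediv_of_pos (by omega)]
  rw [moosLoop1_eq, moosLoop2_eq]
  dsimp only
  split_ifs with h1 h2 <;> omega
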